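-- pv_equiv track=rewrite | github.com/mohammed-elkomy/quran-qa | Quran QA 2023-/Task-B/data_scripts/trainer_preprocessing/bert_qa_preprocessing.py | get_start_and_end_of_passage
-- ===== SOURCE A (Python) =====
-- def get_start_and_end_of_passage(input_ids, pad_on_right, sequence_ids):
--     # since the question and passage are packed together as "QQQQQQQQQPPPPPPPPPP" for pad_on_right = True and sequence_ids are 0000000011111111111
--     # Start token index of the current span in the text.
--     token_start_index = 0
--     while sequence_ids[token_start_index] != (1 if pad_on_right else 0):
--         token_start_index += 1
--     # End token index of the current span in the text.
--     token_end_index = len(input_ids) - 1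
--     while sequence_ids[token_end_index] != (1 if pad_on_right else 0):
--         token_end_index -= 1
--     return token_start_index, token_end_index
-- ===== SOURCE B (Python) =====
-- def get_start_and_end_of_passage(input_ids, pad_on_right, sequence_ids):
--     # One forward pass: collect every token index belonging to the passage,
--     # then read off the first and last.  matches[0] / matches[-1] raise
--     # IndexError when the passage marker is absent, like A's loop overrun.
--     target = 1 if pad_on_right else 0
--     matches = [i for i, s in enumerate(sequence_ids) if s == target]
--     return matches[0], matches[-1]
-- ===== Notes on version B (the rewrite author's own statement) =====
-- stated objective: simpler
-- what changed: Replaces A's two separate boundary scans (a forward while-loop and a backward while-loop over len(input_ids)-1) by a single enumerate pass that collects all passage-token indices and returns the first and last of that list.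
-- outside the precondition, e.g. on get_start_and_end_of_passage([5], True, [1, 1]): A returns (0, 0), B returns (0, 1); on get_start_and_end_of_passage([], True, [1]): A returns (0, -1), B returns (0, 0)
import Mathlib
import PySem

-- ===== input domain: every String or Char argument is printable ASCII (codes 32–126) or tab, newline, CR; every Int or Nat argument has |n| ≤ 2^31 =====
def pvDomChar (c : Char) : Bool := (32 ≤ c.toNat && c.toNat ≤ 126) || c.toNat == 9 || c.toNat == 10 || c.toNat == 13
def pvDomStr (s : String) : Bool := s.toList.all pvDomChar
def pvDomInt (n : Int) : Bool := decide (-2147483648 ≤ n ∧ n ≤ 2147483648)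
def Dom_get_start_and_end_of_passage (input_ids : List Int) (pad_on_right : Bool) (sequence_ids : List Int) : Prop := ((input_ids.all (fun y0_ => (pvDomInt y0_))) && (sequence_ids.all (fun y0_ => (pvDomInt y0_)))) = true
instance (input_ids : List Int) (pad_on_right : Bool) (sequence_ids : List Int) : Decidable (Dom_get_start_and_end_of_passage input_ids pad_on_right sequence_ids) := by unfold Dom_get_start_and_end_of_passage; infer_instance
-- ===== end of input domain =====

-- B replaces A's two boundary while-loops by one enumerate pass collecting the passage indices
-- and reading off its first and last element (objective: simpler).


-- ===== PORT A =====
-- forward while-loop: `while sequence_ids[token_start_index] != target: token_start_index += 1`.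
-- The out-of-range branch (Python: IndexError) returns i; it is unreachable under Pre_.
def pvFwdScan (seq : List Int) (t : Int) (i : Nat) : Nat :=
  if _h : i < seq.length then
    if PySem.List.pyGet? seq (i : Int) == some t then i else pvFwdScan seq t (i + 1)
  else i
termination_by seq.length - i

-- backward while-loop, with the index represented as k = token_end_index + 1 (so k = 0 means the
-- index went below 0, where Python would wrap to negative indices; unreachable under Pre_, which
-- guarantees the target is found at a nonnegative plain index first).
def pvBwdScan (seq : List Int) (t : Int) : Nat → Int
  | 0 => -1
  | Nat.succ k => if PySem.List.pyGet? seq (k : Int) == some t then (k : Int) else pvBwdScan seq t k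

def get_start_and_end_of_passage (input_ids : List Int) (pad_on_right : Bool) (sequence_ids : List Int) : Int × Int :=
  let target : Int := if pad_on_right then 1 else 0
  let token_start_index : Nat := pvFwdScan sequence_ids target 0
  let token_end_index : Int := pvBwdScan sequence_ids target input_ids.length
  ((token_start_index : Int), token_end_index)

-- ===== PORT B =====
-- matches = [i for i, s in enumerate(sequence_ids) if s == target]; return matches[0], matches[-1].
-- headD/getLastD defaults are unreachable under Pre_ (matches is nonempty); Python raises IndexError there.
def get_start_and_end_of_passage_alt (input_ids : List Int) (pad_on_right : Bool) (sequence_ids : List Int) : Int × Int :=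
  let target : Int := if pad_on_right then 1 else 0
  let matchList : List Int := (PySem.List.enumerate sequence_ids 0).filterMap
    (fun p => if p.2 == target then some p.1 else none)  -- Python's `matches` (a Lean keyword)
  (matchList.headD 0, matchList.getLastD 0)

-- ===== PRECONDITION & SPEC =====
-- Pre_ restricts to well-formed packed sequences: input_ids and sequence_ids have the same length
-- and the passage marker occurs in sequence_ids.  It excludes (a) inputs where the marker is
-- absent — A's forward while-loop overruns and raises IndexError (B raises too) — and
-- (b) malformed inputs with len(input_ids) != len(sequence_ids), where A's backward scan starts
-- at len(input_ids)-1 inside (or past) sequence_ids and may wrap through negative indices.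
def Pre_get_start_and_end_of_passage (input_ids : List Int) (pad_on_right : Bool) (sequence_ids : List Int) : Prop :=
  input_ids.length = sequence_ids.length ∧ (if pad_on_right then (1 : Int) else 0) ∈ sequence_ids
instance (input_ids : List Int) (pad_on_right : Bool) (sequence_ids : List Int) : Decidable (Pre_get_start_and_end_of_passage input_ids pad_on_right sequence_ids) := by unfold Pre_get_start_and_end_of_passage; infer_instance

def pvWitness_get_start_and_end_of_passage : List Int × Bool × List Int := ([9, 9], true, [0, 1])

def Spec_get_start_and_end_of_passage (input_ids : List Int) (pad_on_right : Bool) (sequence_ids : List Int) (out : Int × Int) : Prop := out = get_start_and_end_of_passage_alt input_ids pad_on_right sequence_ids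
instance (input_ids : List Int) (pad_on_right : Bool) (sequence_ids : List Int) (out : Int × Int) : Decidable (Spec_get_start_and_end_of_passage input_ids pad_on_right sequence_ids out) := by unfold Spec_get_start_and_end_of_passage; infer_instance

-- ===== CLAIM (what is proved, stated in full; the proofs are below) =====
def Claim_equal_get_start_and_end_of_passage : Prop := ∀ (input_ids : List Int) (pad_on_right : Bool) (sequence_ids : List Int), Dom_get_start_and_end_of_passage input_ids pad_on_right sequence_ids → Pre_get_start_and_end_of_passage input_ids pad_on_right sequence_ids → Spec_get_start_and_end_of_passage input_ids pad_on_right sequence_ids (get_start_and_end_of_passage input_ids pad_on_right sequence_ids)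

-- ===== LEMMAS AND PROOFS =====
-- the index list B builds, with an explicit start offset (proof-side abbreviation)
def pvM (t s : Int) (l : List Int) : List Int :=
  (PySem.List.enumerate l s).filterMap (fun p => if p.2 == t then some p.1 else none)

lemma pvM_cons (t s a : Int) (l : List Int) :
    pvM t s (a :: l) = (if a = t then [s] else []) ++ pvM t (s + 1) l := by
  simp [pvM, PySem.List.enumerate_cons]
  split_ifs <;> simp_all

lemma pvM_shift (t : Int) (l : List Int) : ∀ s : Int, pvM t s l = (pvM t 0 l).map (· + s) := by
  induction l with
  | nil => intro s; simp [pvM]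
  | cons a l ih =>
      intro s
      rw [pvM_cons, pvM_cons, ih (s + 1), ih (0 + 1), List.map_append, List.map_map]
      congr 1
      · split_ifs <;> simp
      · congr 1; funext x; simp [Function.comp]; ring

lemma pvM_ne_nil (t s : Int) (l : List Int) (h : t ∈ l) : pvM t s l ≠ [] := by
  induction l generalizing s with
  | nil => simp at h
  | cons a l ih =>
      rw [pvM_cons]
      rcases List.mem_cons.mp h with h | h
      · subst h; simp
      · intro hc
        rcases List.append_eq_nil_iff.mp hc with ⟨_, h2⟩
        exact ih (s + 1) h h2

lemma pvM_append_singleton (t a : Int) (l : List Int) :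
    pvM t 0 (l ++ [a]) = pvM t 0 l ++ (if a = t then [(l.length : Int)] else []) := by
  simp [pvM, PySem.List.enumerate_append, PySem.List.enumerate_cons]
  split_ifs <;> simp_all

lemma pvFwdScan_shift (fuel : Nat) : ∀ (l : List Int) (a t : Int) (i : Nat), l.length - i ≤ fuel →
    pvFwdScan (a :: l) t (i + 1) = pvFwdScan l t i + 1 := by
  induction fuel with
  | zero =>
      intro l a t i hf
      have hi : ¬ i < l.length := by omega
      have h1 : ¬ (i + 1 < (a :: l).length) := by simp only [List.length_cons]; omega
      conv_lhs => rw [pvFwdScan]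
      conv_rhs => rw [pvFwdScan]
      rw [dif_neg h1, dif_neg hi]
  | succ n ih =>
      intro l a t i hf
      conv_lhs => rw [pvFwdScan]
      conv_rhs => rw [pvFwdScan]
      by_cases hi : i < l.length
      · have h1 : i + 1 < (a :: l).length := by simp only [List.length_cons]; omega
        rw [dif_pos h1, dif_pos hi]
        have hg : PySem.List.pyGet? (a :: l) ((i + 1 : Nat) : Int) = PySem.List.pyGet? l (i : Int) := by
          push_cast
          exact PySem.List.pyGet?_cons_succ a l i
        rw [hg]
        split_ifs with hc
        · rfl
        · exact ih l a t (i + 1) (by omega)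
      · have h1 : ¬ (i + 1 < (a :: l).length) := by simp only [List.length_cons]; omega
        rw [dif_neg h1, dif_neg hi]

lemma pvFwdScan_head (t : Int) (seq : List Int) (h : t ∈ seq) :
    ((pvFwdScan seq t 0 : Nat) : Int) = (pvM t 0 seq).headD 0 := by
  induction seq with
  | nil => simp at h
  | cons a l ih =>
      have h0 : 0 < (a :: l).length := by simp
      conv_lhs => rw [pvFwdScan]
      rw [dif_pos h0]
      simp only [Nat.cast_zero, PySem.List.pyGet?_zero_cons]
      by_cases ha : a = t
      · rw [if_pos (by simp [ha]), pvM_cons, if_pos ha]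
        simp
      · have ht : t ∈ l := by
          rcases List.mem_cons.mp h with h1 | h1
          · exact absurd h1.symm ha
          · exact h1
        have hne := pvM_ne_nil t 0 l ht
        rw [if_neg (by simp [ha]), pvFwdScan_shift l.length l a t 0 (by omega),
          pvM_cons, if_neg ha, List.nil_append, pvM_shift t l (0 + 1)]
        rcases hx : pvM t 0 l with _ | ⟨x, xs⟩
        · exact absurd hx hne
        · have hih := ih ht
          rw [hx] at hih
          simp only [List.map_cons, List.headD_cons] at hih ⊢
          push_cast
          omega

lemma pvBwdScan_frozen (l : List Int) (a t : Int) : ∀ k : Nat, k ≤ l.length →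
    pvBwdScan (l ++ [a]) t k = pvBwdScan l t k := by
  intro k
  induction k with
  | zero => intro _; rfl
  | succ k ih =>
      intro hk
      have hlt : k < l.length := by omega
      rw [pvBwdScan, pvBwdScan]
      have hg : PySem.List.pyGet? (l ++ [a]) (k : Int) = PySem.List.pyGet? l (k : Int) := by
        simp [PySem.List.pyGet?_natCast, List.getElem?_append_left hlt]
      rw [hg, ih (by omega)]

lemma pvBwdScan_last (t : Int) (seq : List Int) (h : t ∈ seq) :
    pvBwdScan seq t seq.length = (pvM t 0 seq).getLastD 0 := by
  induction seq using List.reverseRecOn with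
  | nil => simp at h
  | append_singleton l a ih =>
      have hlen : (l ++ [a]).length = l.length + 1 := by simp
      rw [hlen, pvBwdScan]
      have hg : PySem.List.pyGet? (l ++ [a]) ((l.length : Nat) : Int) = some a :=
        PySem.List.pyGet?_append_length (pre := l) (y := a) (ys := [])
      rw [hg, pvM_append_singleton]
      by_cases ha : a = t
      · simp [ha]
      · have ht : t ∈ l := by
          rcases List.mem_append.mp h with h | h
          · exact h
          · simp at h; exact absurd h.symm ha
        have hne : pvM t 0 l ≠ [] := pvM_ne_nil t 0 l ht
        simp only [Option.some.injEq, beq_iff_eq, ha, if_false, List.append_nil]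
        rw [pvBwdScan_frozen l a t l.length (le_refl _), ih ht]

-- ===== VERDICT (by name: the statement is the Claim_ definition above) =====
theorem get_start_and_end_of_passage_spec : Claim_equal_get_start_and_end_of_passage := by
  intro input_ids pad_on_right sequence_ids _hdom hpre
  obtain ⟨hlen, hmem⟩ := hpre
  unfold Spec_get_start_and_end_of_passage
  simp only [get_start_and_end_of_passage, get_start_and_end_of_passage_alt]
  rw [Prod.mk.injEq]
  refine ⟨pvFwdScan_head _ _ hmem, ?_⟩
  rw [hlen]
  exact pvBwdScan_last _ _ hmem
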